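-- pv_equiv track=rewrite | github.com/Abhi-Bagai/Advent-of-code-2025 | Day 10/Puzzle 2/day_ten_p_two.py | add_green_tiles
-- ===== SOURCE A (Python) =====
-- def add_green_tiles(green_coordinates, size, minimum):
--     grid = []
--     for y in range(minimum, size):
--         row = []
--         for x in range(minimum, size):
--             point = '.'
--             if (x, y) in green_coordinates:
--                 point = 'X'
--             row += point
--         grid.append(row)
--     return grid
-- ===== SOURCE B (Python) =====
-- def add_green_tiles(green_coordinates, size, minimum):
--     n = max(size - minimum, 0)
--     grid = [['.'] * n for _ in range(n)]
--     for (x, y) in green_coordinates: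
--         if minimum <= x < size and minimum <= y < size:
--             grid[y - minimum][x - minimum] = 'X'
--     return grid
-- ===== Notes on version B (the rewrite author's own statement) =====
-- stated objective: alternative
-- what changed: Replaces the per-cell membership scan over green_coordinates with a blank-grid build followed by a single scatter pass that writes 'X' at each in-range point; trades the O(n^2*g) scan for O(n^2+g) work, though both remain quadratic in the grid side.
import Mathlib
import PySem

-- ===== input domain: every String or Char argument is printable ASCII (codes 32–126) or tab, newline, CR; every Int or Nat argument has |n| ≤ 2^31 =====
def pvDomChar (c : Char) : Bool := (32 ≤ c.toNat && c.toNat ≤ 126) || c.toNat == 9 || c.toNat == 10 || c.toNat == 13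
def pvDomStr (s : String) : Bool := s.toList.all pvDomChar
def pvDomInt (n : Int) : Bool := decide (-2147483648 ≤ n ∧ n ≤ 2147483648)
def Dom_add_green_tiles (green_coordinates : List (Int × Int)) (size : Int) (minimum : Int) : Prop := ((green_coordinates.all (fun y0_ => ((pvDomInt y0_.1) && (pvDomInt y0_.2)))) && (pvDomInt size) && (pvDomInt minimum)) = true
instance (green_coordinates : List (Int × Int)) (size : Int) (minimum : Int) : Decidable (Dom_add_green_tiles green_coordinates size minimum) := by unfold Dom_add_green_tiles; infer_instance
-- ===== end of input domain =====

-- B replaces A's per-cell membership scan with a blank-grid build plus one scatter pass over the points (objective: alternative).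

-- ===== PORT A =====
def add_green_tiles (green_coordinates : List (Int × Int)) (size : Int) (minimum : Int) : List (List String) :=
  (PySem.List.pyRange minimum size 1).foldl (fun grid y =>
    grid ++ [(PySem.List.pyRange minimum size 1).foldl (fun row x =>
      row ++ [if green_coordinates.contains (x, y) then "X" else "."]) []]) []

-- ===== PORT B =====
def add_green_tiles_alt (green_coordinates : List (Int × Int)) (size : Int) (minimum : Int) : List (List String) :=
  let n : Nat := (max (size - minimum) 0).toNat
  let grid : List (List String) := (List.range n).map (fun _ => List.replicate n ".")
  green_coordinates.foldl (fun g p =>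
    if minimum ≤ p.1 ∧ p.1 < size ∧ minimum ≤ p.2 ∧ p.2 < size then
      g.modify (p.2 - minimum).toNat (fun row => row.set (p.1 - minimum).toNat "X")
    else g) grid

-- ===== PRECONDITION & SPEC =====
def Spec_add_green_tiles (green_coordinates : List (Int × Int)) (size : Int) (minimum : Int) (out : List (List String)) : Prop := out = add_green_tiles_alt green_coordinates size minimum
instance (green_coordinates : List (Int × Int)) (size : Int) (minimum : Int) (out : List (List String)) : Decidable (Spec_add_green_tiles green_coordinates size minimum out) := by unfold Spec_add_green_tiles; infer_instance

-- ===== CLAIM (what is proved, stated in full; the proofs are below) =====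
def Claim_equal_add_green_tiles : Prop := ∀ (green_coordinates : List (Int × Int)) (size : Int) (minimum : Int), Dom_add_green_tiles green_coordinates size minimum → Spec_add_green_tiles green_coordinates size minimum (add_green_tiles green_coordinates size minimum)

-- ===== LEMMAS AND PROOFS =====

-- normal form: the grid as a table of a Boolean "is marked" predicate
def pvMkGrid (m : Int) (n : Nat) (P : Int → Int → Bool) : List (List String) :=
  (List.range n).map (fun i : Nat => (List.range n).map (fun j : Nat =>
    if P (m + (j : Int)) (m + (i : Int)) then "X" else "."))

theorem pvFoldlPush {α β : Type} (f : α → β) (l : List α) (init : List β) :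
    l.foldl (fun acc t => acc ++ [f t]) init = init ++ l.map f := by
  induction l generalizing init with
  | nil => simp
  | cons a l ih => simp [List.foldl_cons, ih]

theorem pvMkGrid_congr (m : Int) (n : Nat) (P Q : Int → Int → Bool)
    (h : ∀ i j : Nat, i < n → j < n → P (m + (j : Int)) (m + (i : Int)) = Q (m + (j : Int)) (m + (i : Int))) :
    pvMkGrid m n P = pvMkGrid m n Q := by
  unfold pvMkGrid
  refine List.map_congr_left (fun i hi => ?_)
  refine List.map_congr_left (fun j hj => ?_)
  rw [h i j (List.mem_range.mp hi) (List.mem_range.mp hj)]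

-- port A is the table of the membership predicate
theorem pvA_eq (green : List (Int × Int)) (s m : Int) :
    add_green_tiles green s m
      = pvMkGrid m (s - m).toNat (fun a b => green.contains (a, b)) := by
  unfold add_green_tiles pvMkGrid
  rw [PySem.List.pyRange_one]
  simp only [pvFoldlPush, List.nil_append, List.map_map, Function.comp_def]

-- scattering one in-range point marks exactly that cell
theorem pvSet_mkGrid (m : Int) (n : Nat) (P : Int → Int → Bool) (x y : Int)
    (hx1 : m ≤ x) (_hx2 : (x - m).toNat < n) (hy1 : m ≤ y) (_hy2 : (y - m).toNat < n) :
    (pvMkGrid m n P).modify (y - m).toNat (fun row => row.set (x - m).toNat "X")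
      = pvMkGrid m n (fun a b => (decide (a = x) && decide (b = y)) || P a b) := by
  apply List.ext_getElem
  · simp [pvMkGrid, List.length_modify]
  · intro i h1 h2
    rw [List.getElem_modify]
    simp only [pvMkGrid, List.length_map, List.length_range] at h2
    simp only [pvMkGrid, List.getElem_map, List.getElem_range]
    by_cases hiy : (y - m).toNat = i
    · rw [if_pos hiy]
      apply List.ext_getElem
      · simp
      · intro j h3 h4
        rw [List.getElem_set]
        simp only [List.getElem_map, List.getElem_range, List.length_map,
          List.length_range] at h4 ⊢
        by_cases hjx : (x - m).toNat = j
        · have hax : m + (j : Int) = x := by omega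
          have hay : m + (i : Int) = y := by omega
          rw [if_pos hjx]
          simp [hax, hay]
        · have hax : ¬ (m + (j : Int) = x) := by omega
          rw [if_neg hjx]
          simp [hax]
    · rw [if_neg hiy]
      have hay : ¬ (m + (i : Int) = y) := by omega
      refine List.map_congr_left (fun j _ => ?_)
      simp [hay]

-- the scatter loop over the points, with the table invariant
theorem pvScatter (s m : Int) (ps : List (Int × Int)) (P : Int → Int → Bool) :
    ps.foldl (fun g p =>
        if m ≤ p.1 ∧ p.1 < s ∧ m ≤ p.2 ∧ p.2 < s then
          g.modify (p.2 - m).toNat (fun row => row.set (p.1 - m).toNat "X")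
        else g) (pvMkGrid m (s - m).toNat P)
      = pvMkGrid m (s - m).toNat (fun a b => P a b || ps.contains (a, b)) := by
  induction ps generalizing P with
  | nil => simp
  | cons p ps ih =>
    rw [List.foldl_cons]
    by_cases hp : m ≤ p.1 ∧ p.1 < s ∧ m ≤ p.2 ∧ p.2 < s
    · rw [if_pos hp]
      rw [pvSet_mkGrid m _ P p.1 p.2 hp.1 (by omega) hp.2.2.1 (by omega)]
      rw [ih]
      apply pvMkGrid_congr
      intro i j _ _
      by_cases h1 : m + (j : Int) = p.1 <;> by_cases h2 : m + (i : Int) = p.2 <;>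
        simp [h1, h2, Prod.ext_iff, Bool.or_comm]
    · rw [if_neg hp]
      rw [ih]
      apply pvMkGrid_congr
      intro i j hi hj
      have h1 : (decide (m + (j : Int) = p.1) && decide (m + (i : Int) = p.2)) = false := by
        by_cases e1 : m + (j : Int) = p.1
        · by_cases e2 : m + (i : Int) = p.2
          · exact absurd ⟨by omega, by omega, by omega, by omega⟩ hp
          · simp [e2]
        · simp [e1]
      simp [Prod.ext_iff, h1]

-- port B is the same table
theorem pvB_eq (green : List (Int × Int)) (s m : Int) :
    add_green_tiles_alt green s m
      = pvMkGrid m (s - m).toNat (fun a b => green.contains (a, b)) := by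
  unfold add_green_tiles_alt
  have hn : (max (s - m) 0).toNat = (s - m).toNat := by omega
  have hblank : (List.range (s - m).toNat).map (fun _ => List.replicate (s - m).toNat (".":String))
      = pvMkGrid m (s - m).toNat (fun _ _ => false) := by
    unfold pvMkGrid
    refine List.map_congr_left (fun i _ => ?_)
    simp [List.map_const']
  simp only [hn]
  rw [hblank, pvScatter]
  apply pvMkGrid_congr
  intro i j _ _
  simp

-- ===== VERDICT (by name: the statement is the Claim_ definition above) =====
theorem add_green_tiles_spec : Claim_equal_add_green_tiles := by
  intro green s m _
  unfold Spec_add_green_tiles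
  rw [pvA_eq, pvB_eq]
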